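-- pv_equiv track=rewrite | github.com/LucasConde22/TPs-TDA | Guías/PD/14.py | lunatico
-- ===== SOURCE A (Python) =====
-- def lunatico(ganancias):
--     if len(ganancias) == 0:
--         return []
--     if len(ganancias) == 1:
--         return [0]
--     if len(ganancias) == 2:
--         return [0] if ganancias[0] >= ganancias[1] else [1]
--
--     sol1 = obtener_ganancias(0, len(ganancias) - 1, ganancias)
--     sol2 = obtener_ganancias(1, len(ganancias), ganancias)
--     if sol1[-1] >= sol2[-1]:
--         sol, offset = sol1, 0
--     else:
--         sol, offset = sol2, 1
--
--     casas, restante, i = [], sol[-1], len(sol) - 1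
--     while restante != 0:
--         if sol[i] == sol[i - 1]:
--             i -= 1
--             continue
--
--         casas.append(i + offset)
--         restante -= ganancias[i + offset]
--         i -= 2
--
--     return casas[::-1]
--
-- def obtener_ganancias(ini, fin, ganancias):
--     ante_anterior, anterior, sol = 0, 0, []
--     for i in range(ini, fin):
--         sol.append(max(ante_anterior + ganancias[i], anterior))
--         ante_anterior, anterior = anterior, sol[-1]
--     return sol
-- ===== SOURCE B (Python) =====
-- def lunatico(ganancias):
--     n = len(ganancias)
--     if n == 0:
--         return []
--     if n == 1:
--         return [0]
--     if n == 2: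
--         return [0] if ganancias[0] >= ganancias[1] else [1]
--
--     def mejor(ini, fin):
--         # forward DP carrying the chosen indices alongside the value;
--         # the indices are kept as shared (index, rest) chains, newest first
--         prev_val, cur_val = 0, 0
--         prev_node, cur_node = None, None
--         for i in range(ini, fin):
--             cand = prev_val + ganancias[i]
--             if cand > cur_val:
--                 prev_val, cur_val, prev_node, cur_node = cur_val, cand, cur_node, (i, prev_node)
--             else:
--                 prev_val, prev_node = cur_val, cur_node
--         out = []
--         while cur_node is not None:
--             out.append(cur_node[0])
--             cur_node = cur_node[1]
--         out.reverse()
--         return cur_val, out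
--
--     v1, l1 = mejor(0, n - 1)
--     v2, l2 = mejor(1, n)
--     return l1 if v1 >= v2 else l2
-- ===== Notes on version B (the rewrite author's own statement) =====
-- stated objective: simpler
-- what changed: B carries the chosen indices forward through each linear DP as shared (index, rest) chains (take a house when two-back value + gain strictly beats the one-back value), so A's value table and its backward reconstruction pass disappear; dropping the table and second pass is the constant-factor speedup.
-- crash fix: On lists of length >= 3 whose case-1 DP table is a positive constant that wins the case choice (first gain positive, second gain and every case-2 alternative no better, middle gains nonpositive), A's reconstruction skips past index 0 into Python's negative indices and raises IndexError; B returns the singleton list holding index 0 there. — e.g. on lunatico([2, 1, 0, 0]): A raises IndexError, B returns [0]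
import Mathlib
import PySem

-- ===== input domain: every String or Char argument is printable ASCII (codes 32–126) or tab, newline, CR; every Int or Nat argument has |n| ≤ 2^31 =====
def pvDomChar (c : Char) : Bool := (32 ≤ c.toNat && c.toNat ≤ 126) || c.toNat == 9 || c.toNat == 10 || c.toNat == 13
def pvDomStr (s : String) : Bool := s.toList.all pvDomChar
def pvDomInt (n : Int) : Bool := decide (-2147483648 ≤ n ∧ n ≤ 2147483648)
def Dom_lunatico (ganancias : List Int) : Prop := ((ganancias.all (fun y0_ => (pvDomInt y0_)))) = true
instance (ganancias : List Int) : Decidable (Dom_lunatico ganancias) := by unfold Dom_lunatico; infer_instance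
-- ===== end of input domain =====

-- B replaces A's backward reconstruction from the DP value table by carrying the chosen
-- index list forward through the DP (objective: simpler — no table, no rebuild pass).
-- ===== PORT A =====
def obtenerGanancias (ini fin : Int) (ganancias : List Int) : List Int :=
  ((PySem.List.pyRange ini fin 1).foldl
    (fun (st : Int × Int × List Int) i =>
      let s := max (st.1 + PySem.List.pyGetD ganancias i 0) st.2.1
      (st.2.1, s, st.2.2 ++ [s]))
    ((0 : Int), (0 : Int), ([] : List Int))).2.2

-- the 'while restante != 0' loop; fuel only makes it total (Python raises where it runs out)
def loopA (sol ganancias : List Int) (offset : Int) : Nat → Int → Int → List Int → List Int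
  | 0, _, _, casas => casas
  | f + 1, i, restante, casas =>
    if restante ≠ 0 then
      if PySem.List.pyGetD sol i 0 = PySem.List.pyGetD sol (i - 1) 0 then
        loopA sol ganancias offset f (i - 1) restante casas
      else
        loopA sol ganancias offset f (i - 2)
          (restante - PySem.List.pyGetD ganancias (i + offset) 0) (casas ++ [i + offset])
    else casas

def lunatico (ganancias : List Int) : List Int :=
  if ganancias.length = 0 then []
  else if ganancias.length = 1 then [0]
  else if ganancias.length = 2 then
    if PySem.List.pyGetD ganancias 0 0 ≥ PySem.List.pyGetD ganancias 1 0 then [0] else [1]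
  else
    let sol1 := obtenerGanancias 0 ((ganancias.length : Int) - 1) ganancias
    let sol2 := obtenerGanancias 1 (ganancias.length : Int) ganancias
    let pick := PySem.List.pyGetD sol1 (-1) 0 ≥ PySem.List.pyGetD sol2 (-1) 0
    let sol := if pick then sol1 else sol2
    let offset : Int := if pick then 0 else 1
    (loopA sol ganancias offset (sol.length + 4) ((sol.length : Int) - 1)
      (PySem.List.pyGetD sol (-1) 0) []).reverse

-- ===== PORT B =====
def mejorB (ganancias : List Int) (ini fin : Int) : Int × List Int :=
  let st := (PySem.List.pyRange ini fin 1).foldl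
    (fun (st : Int × Int × List Int × List Int) i =>
      let cand := st.1 + PySem.List.pyGetD ganancias i 0
      if cand > st.2.1 then (st.2.1, cand, st.2.2.2, st.2.2.1 ++ [i])
      else (st.2.1, st.2.1, st.2.2.2, st.2.2.2))
    ((0 : Int), (0 : Int), ([] : List Int), ([] : List Int))
  (st.2.1, st.2.2.2)

def lunatico_alt (ganancias : List Int) : List Int :=
  if ganancias.length = 0 then []
  else if ganancias.length = 1 then [0]
  else if ganancias.length = 2 then
    if PySem.List.pyGetD ganancias 0 0 ≥ PySem.List.pyGetD ganancias 1 0 then [0] else [1]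
  else
    let r1 := mejorB ganancias 0 ((ganancias.length : Int) - 1)
    let r2 := mejorB ganancias 1 (ganancias.length : Int)
    if r1.1 ≥ r2.1 then r1.2 else r2.2

-- ===== PRECONDITION & SPEC =====
-- On lists whose case-1 DP table is a positive constant that also wins the case choice,
-- A's reconstruction walks past index 0 into Python's negative-index region and raises
-- IndexError; B returns the intended singleton there.
def Raises_lunatico (ganancias : List Int) : Prop :=
  3 ≤ ganancias.length ∧ 0 < ganancias.getD 0 0 ∧
  ganancias.getD 1 0 ≤ ganancias.getD 0 0 ∧
  (∀ j, j < ganancias.length → 2 ≤ j → j + 2 ≤ ganancias.length → ganancias.getD j 0 ≤ 0) ∧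
  ganancias.getD (ganancias.length - 1) 0 ≤ ganancias.getD 0 0 ∧
  (4 ≤ ganancias.length →
    ganancias.getD 1 0 + ganancias.getD (ganancias.length - 1) 0 ≤ ganancias.getD 0 0)

instance (ganancias : List Int) : Decidable (Raises_lunatico ganancias) := by
  unfold Raises_lunatico; infer_instance

-- Pre_ excludes exactly the inputs on which A raises IndexError (see Raises_ above).
def Pre_lunatico (ganancias : List Int) : Prop := ¬ Raises_lunatico ganancias

instance (ganancias : List Int) : Decidable (Pre_lunatico ganancias) := by
  unfold Pre_lunatico; infer_instance

def pvWitness_lunatico : List Int := [1, 5, 2, 4]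

def pvRaiseWitness_lunatico : List Int := [2, 1, 0, 0]
def pvRaiseWitnessOut_lunatico : List Int := [0]

def Spec_lunatico (ganancias : List Int) (out : List Int) : Prop := out = lunatico_alt ganancias
instance (ganancias : List Int) (out : List Int) : Decidable (Spec_lunatico ganancias out) := by
  unfold Spec_lunatico; infer_instance

-- ===== CLAIM (what is proved, stated in full; the proofs are below) =====
def Claim_equal_lunatico : Prop := ∀ (ganancias : List Int), Dom_lunatico ganancias →
  Pre_lunatico ganancias → Spec_lunatico ganancias (lunatico ganancias)

def Claim_raises_lunatico : Prop :=
  (∀ (ganancias : List Int), Dom_lunatico ganancias → Raises_lunatico ganancias →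
    ¬ Pre_lunatico ganancias) ∧
  (Dom_lunatico pvRaiseWitness_lunatico ∧ Raises_lunatico pvRaiseWitness_lunatico ∧
    lunatico_alt pvRaiseWitness_lunatico = pvRaiseWitnessOut_lunatico)

-- ===== LEMMAS AND PROOFS =====

-- abstract two-back/one-back DP value pair after k steps (values sol[k-2], sol[k-1])
def dpP (gi : Nat → Int) : Nat → Int × Int
  | 0 => (0, 0)
  | k + 1 => ((dpP gi k).2, max ((dpP gi k).1 + gi k) ((dpP gi k).2))

-- the matching pair of chosen-index lists
def dpQ (gi : Nat → Int) (ini : Int) : Nat → List Int × List Int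
  | 0 => ([], [])
  | k + 1 => ((dpQ gi ini k).2,
      if (dpP gi k).1 + gi k > (dpP gi k).2
      then (dpQ gi ini k).1 ++ [ini + (k : Int)] else (dpQ gi ini k).2)

def gif (g : List Int) (ini : Int) : Nat → Int := fun j => PySem.List.pyGetD g (ini + (j : Int)) 0

theorem dpP_le (gi : Nat → Int) (k : Nat) : 0 ≤ (dpP gi k).1 ∧ (dpP gi k).1 ≤ (dpP gi k).2 := by
  induction k with
  | zero => simp [dpP]
  | succ k ih => simp only [dpP]; constructor
                 · exact le_trans ih.1 ih.2
                 · exact le_max_right _ _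

theorem dpP_mono (gi : Nat → Int) {j k : Nat} (h : j ≤ k) : (dpP gi j).2 ≤ (dpP gi k).2 := by
  induction k with
  | zero => simp_all
  | succ k ih =>
    rcases Nat.lt_or_ge j (k + 1) with h' | h'
    · exact le_trans (ih (by omega)) (by simp [dpP])
    · have : j = k + 1 := by omega
      simp [this]

theorem dpQ_pos (gi : Nat → Int) (ini : Int) (k : Nat) :
    ((dpQ gi ini k).1 ≠ [] → 0 < (dpP gi k).1) ∧ ((dpQ gi ini k).2 ≠ [] → 0 < (dpP gi k).2) := by
  induction k with
  | zero => simp [dpQ, dpP]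
  | succ k ih =>
    refine ⟨fun h => ih.2 h, fun h => ?_⟩
    show 0 < max ((dpP gi k).1 + gi k) ((dpP gi k).2)
    by_cases hb : (dpP gi k).1 + gi k > (dpP gi k).2
    · have h1 := (dpP_le gi k).1
      have h2 := (dpP_le gi k).2
      have : 0 < (dpP gi k).1 + gi k := by omega
      exact lt_of_lt_of_le this (le_max_left _ _)
    · have h' : (dpQ gi ini (k + 1)).2 = (dpQ gi ini k).2 := by
        simp only [dpQ, if_neg hb]
      rw [h'] at h
      exact lt_of_lt_of_le (ih.2 h) (le_max_right _ _)

theorem obtA_fold (g : List Int) (ini : Int) (k : Nat) :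
    ((PySem.List.pyRange ini (ini + (k : Int)) 1).foldl
      (fun (st : Int × Int × List Int) i =>
        let s := max (st.1 + PySem.List.pyGetD g i 0) st.2.1
        (st.2.1, s, st.2.2 ++ [s]))
      ((0 : Int), (0 : Int), ([] : List Int)))
    = ((dpP (gif g ini) k).1, (dpP (gif g ini) k).2,
       (List.range k).map (fun j => (dpP (gif g ini) (j + 1)).2)) := by
  induction k with
  | zero => simp [PySem.List.pyRange_one_eq_nil, dpP]
  | succ k ih =>
    have hsplit : PySem.List.pyRange ini (ini + ((k : Int) + 1)) 1
        = PySem.List.pyRange ini (ini + (k : Int)) 1 ++ [ini + (k : Int)] := by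
      rw [show ini + ((k : Int) + 1) = (ini + (k : Int)) + 1 by ring]
      exact PySem.List.pyRange_one_succ_right (by omega)
    rw [show ((k + 1 : Nat) : Int) = (k : Int) + 1 by push_cast; ring, hsplit,
      List.foldl_append, ih]
    simp only [List.foldl_cons, List.foldl_nil, List.range_succ, List.map_append, List.map]
    rfl

theorem mejorB_fold (g : List Int) (ini : Int) (k : Nat) :
    ((PySem.List.pyRange ini (ini + (k : Int)) 1).foldl
      (fun (st : Int × Int × List Int × List Int) i =>
        let cand := st.1 + PySem.List.pyGetD g i 0
        if cand > st.2.1 then (st.2.1, cand, st.2.2.2, st.2.2.1 ++ [i])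
        else (st.2.1, st.2.1, st.2.2.2, st.2.2.2))
      ((0 : Int), (0 : Int), ([] : List Int), ([] : List Int)))
    = ((dpP (gif g ini) k).1, (dpP (gif g ini) k).2,
       (dpQ (gif g ini) ini k).1, (dpQ (gif g ini) ini k).2) := by
  induction k with
  | zero => simp [PySem.List.pyRange_one_eq_nil, dpP, dpQ]
  | succ k ih =>
    have hsplit : PySem.List.pyRange ini (ini + ((k : Int) + 1)) 1
        = PySem.List.pyRange ini (ini + (k : Int)) 1 ++ [ini + (k : Int)] := by
      rw [show ini + ((k : Int) + 1) = (ini + (k : Int)) + 1 by ring]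
      exact PySem.List.pyRange_one_succ_right (by omega)
    rw [show ((k + 1 : Nat) : Int) = (k : Int) + 1 by push_cast; ring, hsplit,
      List.foldl_append, ih]
    simp only [List.foldl_cons, List.foldl_nil, dpP, dpQ, gif]
    by_cases h : (dpP (gif g ini) k).1 + PySem.List.pyGetD g (ini + (k : Int)) 0 > (dpP (gif g ini) k).2
    · rw [if_pos h, if_pos h, max_eq_left (le_of_lt h)]
    · rw [if_neg h, if_neg h, max_eq_right (by omega)]

theorem loop_spec (g : List Int) (ini : Int) (m : Nat) (hm : 1 ≤ m)
    (sol : List Int) (hsol : sol = (List.range m).map (fun j => (dpP (gif g ini) (j + 1)).2))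
    (NC : ¬ (0 < (dpP (gif g ini) 1).2 ∧ (dpP (gif g ini) m).2 = (dpP (gif g ini) 1).2)) :
    ∀ k : Nat, 1 ≤ k → k ≤ m → ∀ fuel acc, k + 1 ≤ fuel →
    loopA sol g ini fuel ((k : Int) - 1) ((dpP (gif g ini) k).2) acc
      = acc ++ ((dpQ (gif g ini) ini k).2).reverse := by
  set gi := gif g ini with hgi
  have hlen : sol.length = m := by rw [hsol]; simp
  have hidx : ∀ j : Nat, j < m → PySem.List.pyGetD sol (j : Int) 0 = (dpP gi (j + 1)).2 := by
    intro j hj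
    rw [PySem.List.pyGetD_natCast, hsol]
    simp [List.getD_eq_getElem?_getD, hj]
  have hlast : PySem.List.pyGetD sol (-1) 0 = (dpP gi m).2 := by
    have hne : sol ≠ [] := by
      intro h; rw [h] at hlen; simp at hlen; omega
    have h1 := hidx (m - 1) (by omega)
    rw [show (m - 1 : Nat) + 1 = m by omega] at h1
    rw [PySem.List.pyGetD_natCast, List.getD_eq_getElem _ _ (by omega)] at h1
    rw [PySem.List.pyGetD_neg_one sol 0 hne, List.getLast_eq_getElem]
    rw [← h1]
    congr 1
    omega
  intro k
  induction k using Nat.strong_induction_on with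
  | _ k IH =>
    intro hk1 hkm fuel acc hfuel
    obtain ⟨f, rfl⟩ : ∃ f, fuel = f + 1 := ⟨fuel - 1, by omega⟩
    obtain ⟨ka, rfl⟩ : ∃ ka, k = ka + 1 := ⟨k - 1, by omega⟩
    by_cases hz : (dpP gi (ka + 1)).2 = 0
    · have hq : (dpQ gi ini (ka + 1)).2 = [] := by
        by_contra h
        have := (dpQ_pos gi ini (ka + 1)).2 h
        omega
      simp only [loopA, hz, hq]
      simp
    · have hpos : 0 < (dpP gi (ka + 1)).2 := by
        have := (dpP_le gi (ka + 1)).1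
        have := (dpP_le gi (ka + 1)).2
        omega
      have hik : ((ka + 1 : Nat) : Int) - 1 = ((ka : Nat) : Int) := by push_cast; ring
      have hsk : PySem.List.pyGetD sol (((ka + 1 : Nat) : Int) - 1) 0 = (dpP gi (ka + 1)).2 := by
        rw [hik]; exact hidx ka (by omega)
      simp only [loopA, if_pos hz]
      match ka with
      | 0 =>
        -- k = 1: Python compares sol[0] with sol[-1] (the LAST element)
        have hm1 : ((1 : Nat) : Int) - 1 - 1 = -1 := by norm_num
        have hs1 : PySem.List.pyGetD sol (((1 : Nat) : Int) - 1 - 1) 0 = (dpP gi m).2 := by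
          rw [hm1]; exact hlast
        have hne : (dpP gi 1).2 ≠ (dpP gi m).2 := by
          intro h
          exact NC ⟨by omega, by omega⟩
        rw [hsk, hs1, if_neg hne]
        have hv1 : (dpP gi 1).2 = max (0 + gi 0) 0 := rfl
        have hgpos : (dpP gi 1).2 = gi 0 ∧ 0 < gi 0 := by
          rcases (by omega : gi 0 ≤ 0 ∨ 0 < gi 0) with h | h
          · rw [hv1, max_eq_right (by omega)] at hpos; omega
          · constructor
            · rw [hv1, max_eq_left (by omega)]; omega
            · exact h
        have hg0 : PySem.List.pyGetD g (((1 : Nat) : Int) - 1 + ini) 0 = gi 0 := by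
          rw [hgi]; show PySem.List.pyGetD g _ 0 = PySem.List.pyGetD g (ini + ((0:Nat):Int)) 0
          norm_num
        rw [hg0]
        have hr0 : (dpP gi 1).2 - gi 0 = 0 := by omega
        rw [hr0]
        obtain ⟨fb, rfl⟩ : ∃ fb, f = fb + 1 := ⟨f - 1, by omega⟩
        simp only [loopA, ne_eq, not_true_eq_false, if_false]
        have hq1 : (dpQ gi ini 1).2 = [ini + ((0 : Nat) : Int)] := by
          show (if (dpP gi 0).1 + gi 0 > (dpP gi 0).2 then
            (dpQ gi ini 0).1 ++ [ini + ((0:Nat):Int)] else (dpQ gi ini 0).2) = _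
          rw [if_pos (by show (0:Int) + gi 0 > 0; omega)]
          rfl
        rw [hq1]
        simp
      | kb + 1 =>
        have hik2 : ((kb + 1 + 1 : Nat) : Int) - 1 - 1 = ((kb + 1 : Nat) : Int) - 1 := by
          push_cast; ring
        have hsk2 : PySem.List.pyGetD sol (((kb + 1 + 1 : Nat) : Int) - 1 - 1) 0
            = (dpP gi (kb + 1)).2 := by
          rw [hik2, show ((kb + 1 : Nat) : Int) - 1 = ((kb : Nat) : Int) by push_cast; ring]
          exact hidx kb (by omega)
        rw [hsk, hsk2]
        have hvk : (dpP gi (kb + 2)).2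
            = max ((dpP gi (kb + 1)).1 + gi (kb + 1)) ((dpP gi (kb + 1)).2) := rfl
        by_cases heq : (dpP gi (kb + 2)).2 = (dpP gi (kb + 1)).2
        · -- sol[i] == sol[i-1]: skip
          rw [if_pos heq]
          have hnb : (dpP gi (kb + 1)).1 + gi (kb + 1) ≤ (dpP gi (kb + 1)).2 := by
            have h1 := le_max_left ((dpP gi (kb + 1)).1 + gi (kb + 1)) ((dpP gi (kb + 1)).2)
            rw [← hvk, heq] at h1
            exact h1
          have hqeq : (dpQ gi ini (kb + 2)).2 = (dpQ gi ini (kb + 1)).2 := by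
            show (if _ > _ then _ else _) = _
            rw [if_neg (not_lt.mpr hnb)]
          rw [hqeq, heq, hik2]
          exact IH (kb + 1) (by omega) (by omega) (by omega) f acc (by omega)
        · -- strictly greater: the house was taken
          rw [if_neg heq]
          have htk : (dpP gi (kb + 1)).2 < (dpP gi (kb + 1)).1 + gi (kb + 1) := by
            rcases lt_or_ge ((dpP gi (kb + 1)).2) ((dpP gi (kb + 1)).1 + gi (kb + 1)) with h | h
            · exact h
            · exact absurd (by rw [hvk, max_eq_right h]) heq
          have hva : (dpP gi (kb + 2)).2 = (dpP gi (kb + 1)).1 + gi (kb + 1) := by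
            rw [hvk, max_eq_left (le_of_lt htk)]
          have hgk : PySem.List.pyGetD g ((((kb + 1 + 1 : Nat) : Int) - 1) + ini) 0
              = gi (kb + 1) := by
            rw [hgi]
            show PySem.List.pyGetD g _ 0 = PySem.List.pyGetD g (ini + ((kb + 1 : Nat) : Int)) 0
            congr 1
            push_cast; ring
          rw [hgk]
          have hrst : (dpP gi (kb + 2)).2 - gi (kb + 1) = (dpP gi kb).2 := by
            have : (dpP gi (kb + 1)).1 = (dpP gi kb).2 := rfl
            omega
          rw [hrst]
          have hqk : (dpQ gi ini (kb + 2)).2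
              = (dpQ gi ini kb).2 ++ [ini + ((kb + 1 : Nat) : Int)] := by
            show (if _ > _ then (dpQ gi ini (kb + 1)).1 ++ _ else _) = _
            rw [if_pos htk]
            rfl
          have hca : (((kb + 1 + 1 : Nat) : Int) - 1) + ini = ini + ((kb + 1 : Nat) : Int) := by
            push_cast; ring
          rw [hca, hqk]
          match kb with
          | 0 =>
            -- restante becomes 0; one more iteration exits the loop
            have h0 : (dpP gi 0).2 = 0 := rfl
            rw [h0]
            obtain ⟨fb, rfl⟩ : ∃ fb, f = fb + 1 := ⟨f - 1, by omega⟩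
            simp only [loopA, ne_eq, not_true_eq_false, if_false]
            have : (dpQ gi ini 0).2 = [] := rfl
            rw [this]
            simp
          | kc + 1 =>
            have hidx3 : ((kc + 1 + 1 + 1 : Nat) : Int) - 1 - 2 = ((kc + 1 : Nat) : Int) - 1 := by
              push_cast; ring
            rw [hidx3]
            rw [IH (kc + 1) (by omega) (by omega) (by omega) f
              (acc ++ [ini + ((kc + 1 + 1 : Nat) : Int)]) (by omega)]
            simp

theorem gif_zero (g : List Int) (j : Nat) : gif g 0 j = g.getD j 0 := by
  show PySem.List.pyGetD g (0 + (j : Int)) 0 = _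
  rw [show (0 : Int) + (j : Int) = (j : Int) by ring, PySem.List.pyGetD_natCast]

theorem gif_one (g : List Int) (j : Nat) : gif g 1 j = g.getD (j + 1) 0 := by
  show PySem.List.pyGetD g (1 + (j : Int)) 0 = _
  rw [show (1 : Int) + (j : Int) = ((j + 1 : Nat) : Int) by push_cast; ring,
    PySem.List.pyGetD_natCast]

theorem dpP_one (gi : Nat → Int) : (dpP gi 1).2 = max (0 + gi 0) 0 := rfl

-- if case 1's table is a positive constant and case 1 wins, A's input is in the crash set
theorem NC1 (g : List Int) (hn : 3 ≤ g.length)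
    (hpick : (dpP (gif g 1) (g.length - 1)).2 ≤ (dpP (gif g 0) (g.length - 1)).2)
    (hc : 0 < (dpP (gif g 0) 1).2)
    (he : (dpP (gif g 0) (g.length - 1)).2 = (dpP (gif g 0) 1).2) :
    Raises_lunatico g := by
  have hall : ∀ j, 1 ≤ j → j ≤ (g.length - 1) → (dpP (gif g 0) j).2 = (dpP (gif g 0) 1).2 :=
    fun j h1 h2 => le_antisymm (he ▸ dpP_mono (gif g 0) h2) (dpP_mono (gif g 0) h1)
  have hv1 := dpP_one (gif g 0)
  have hg0 : (dpP (gif g 0) 1).2 = (gif g 0) 0 ∧ 0 < (gif g 0) 0 := by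
    rcases (by omega : (gif g 0) 0 ≤ 0 ∨ 0 < (gif g 0) 0) with h | h
    · rw [hv1, max_eq_right (by omega)] at hc; omega
    · exact ⟨by rw [hv1, max_eq_left (by omega)]; omega, h⟩
  refine ⟨hn, ?_, ?_, ?_, ?_, ?_⟩
  · rw [← gif_zero]; omega
  · -- g[1] ≤ g[0]
    have h2 : (dpP (gif g 0) 2).2 = (dpP (gif g 0) 1).2 := hall 2 (by omega) (by omega)
    have hmax : (dpP (gif g 0) 1).1 + (gif g 0) 1 ≤ (dpP (gif g 0) 2).2 := le_max_left _ _
    have hfst : (dpP (gif g 0) 1).1 = 0 := rfl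
    rw [← gif_zero g 0, ← gif_zero g 1]
    omega
  · -- middle entries are ≤ 0
    intro j _ hj2 hjn
    obtain ⟨jb, rfl⟩ : ∃ jb, j = jb + 1 := ⟨j - 1, by omega⟩
    have hlo : (dpP (gif g 0) jb).2 = (dpP (gif g 0) 1).2 := hall jb (by omega) (by omega)
    have hhi : (dpP (gif g 0) (jb + 2)).2 = (dpP (gif g 0) 1).2 := hall (jb + 2) (by omega) (by omega)
    have hmax : (dpP (gif g 0) (jb + 1)).1 + (gif g 0) (jb + 1) ≤ (dpP (gif g 0) (jb + 2)).2 := le_max_left _ _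
    have hfst : (dpP (gif g 0) (jb + 1)).1 = (dpP (gif g 0) jb).2 := rfl
    rw [← gif_zero g (jb + 1)]
    omega
  · -- g[n-1] ≤ g[0]
    obtain ⟨mb, hmb⟩ : ∃ mb, g.length - 1 = mb + 1 := ⟨g.length - 2, by omega⟩
    have hmax : (dpP (gif g 1) mb).1 + (gif g 1) mb ≤ (dpP (gif g 1) (mb + 1)).2 := le_max_left _ _
    have hfst := (dpP_le (gif g 1) mb).1
    have hglast : (gif g 1) mb = g.getD (g.length - 1) 0 := by
      rw [gif_one]; congr 1; omega
    rw [← hglast, ← gif_zero g 0]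
    rw [hmb] at hpick he
    omega
  · -- n ≥ 4: g[1] + g[n-1] ≤ g[0]
    intro h4
    obtain ⟨mb, hmb⟩ : ∃ mb, g.length - 1 = mb + 2 := ⟨g.length - 3, by omega⟩
    have hmax : (dpP (gif g 1) (mb + 1)).1 + (gif g 1) (mb + 1) ≤ (dpP (gif g 1) (mb + 2)).2 := le_max_left _ _
    have hfst : (dpP (gif g 1) (mb + 1)).1 = (dpP (gif g 1) mb).2 := rfl
    have hmono : (dpP (gif g 1) 1).2 ≤ (dpP (gif g 1) mb).2 := dpP_mono (gif g 1) (by omega)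
    have hge : (gif g 1) 0 ≤ (dpP (gif g 1) 1).2 := by have := le_max_left (0 + (gif g 1) 0) 0; rw [dpP_one]; omega
    have hglast : (gif g 1) (mb + 1) = g.getD (g.length - 1) 0 := by
      rw [gif_one]; congr 1; omega
    have hg1 : (gif g 1) 0 = g.getD 1 0 := gif_one g 0
    rw [← hg1, ← hglast, ← gif_zero g 0]
    rw [hmb] at hpick he
    omega

-- case 2's table can never be a constant that wins the case choice
theorem NC2 (g : List Int) (hn : 3 ≤ g.length)
    (hpick : ¬ (dpP (gif g 1) (g.length - 1)).2 ≤ (dpP (gif g 0) (g.length - 1)).2)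
    (hc : 0 < (dpP (gif g 1) 1).2)
    (he : (dpP (gif g 1) (g.length - 1)).2 = (dpP (gif g 1) 1).2) : False := by
  have h1 : (dpP (gif g 0) 2).2 ≤ (dpP (gif g 0) (g.length - 1)).2 := dpP_mono (gif g 0) (by omega)
  have hmax : (dpP (gif g 0) 1).1 + (gif g 0) 1 ≤ (dpP (gif g 0) 2).2 := le_max_left _ _
  have hfst : (dpP (gif g 0) 1).1 = 0 := rfl
  have heq : (gif g 0) 1 = (gif g 1) 0 := by rw [gif_zero, gif_one]
  have hv2 : (dpP (gif g 1) 1).2 = max (0 + (gif g 1) 0) 0 := dpP_one (gif g 1)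
  have : (dpP (gif g 1) 1).2 = (gif g 1) 0 := by
    rcases (by omega : (gif g 1) 0 ≤ 0 ∨ 0 < (gif g 1) 0) with h | h
    · rw [hv2, max_eq_right (by omega)] at hc; omega
    · rw [hv2, max_eq_left (by omega)]; omega
  omega

theorem sol_last (g : List Int) (ini : Int) (m : Nat) (hm : 1 ≤ m) :
    PySem.List.pyGetD ((List.range m).map (fun j => (dpP (gif g ini) (j + 1)).2)) (-1) 0
      = (dpP (gif g ini) m).2 := by
  have hne : (List.range m).map (fun j => (dpP (gif g ini) (j + 1)).2) ≠ [] := by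
    simp; omega
  have h1 : PySem.List.pyGetD ((List.range m).map (fun j => (dpP (gif g ini) (j + 1)).2))
      (((m - 1 : Nat)) : Int) 0 = (dpP (gif g ini) m).2 := by
    rw [PySem.List.pyGetD_natCast]
    simp only [List.getD_eq_getElem?_getD, List.getElem?_map,
      List.getElem?_range (by omega : m - 1 < m), Option.map_some, Option.getD_some]
    rw [Nat.sub_add_cancel hm]
  rw [PySem.List.pyGetD_natCast, List.getD_eq_getElem _ _ (by simp; omega)] at h1
  rw [PySem.List.pyGetD_neg_one _ 0 hne, List.getLast_eq_getElem]
  rw [← h1]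
  congr 1
  simp

-- ===== VERDICT (by name: the statement is the Claim_ definition above) =====
theorem lunatico_spec : Claim_equal_lunatico := by
  intro g _ hpre
  unfold Spec_lunatico
  by_cases h0 : g.length = 0
  · simp [lunatico, lunatico_alt, h0]
  by_cases h1 : g.length = 1
  · simp [lunatico, lunatico_alt, h1]
  by_cases h2 : g.length = 2
  · simp [lunatico, lunatico_alt, h2]
  have hn : 3 ≤ g.length := by omega
  have hm1 : 1 ≤ g.length - 1 := by omega
  have hs1 : obtenerGanancias 0 ((g.length : Int) - 1) g
      = (List.range (g.length - 1)).map (fun j => (dpP (gif g 0) (j + 1)).2) := by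
    unfold obtenerGanancias
    rw [show ((g.length : Int) - 1) = 0 + ((g.length - 1 : Nat) : Int) by omega, obtA_fold]
  have hs2 : obtenerGanancias 1 (g.length : Int) g
      = (List.range (g.length - 1)).map (fun j => (dpP (gif g 1) (j + 1)).2) := by
    unfold obtenerGanancias
    rw [show ((g.length : Int)) = 1 + ((g.length - 1 : Nat) : Int) by omega, obtA_fold]
  have hb1 : mejorB g 0 ((g.length : Int) - 1)
      = ((dpP (gif g 0) (g.length - 1)).2, (dpQ (gif g 0) 0 (g.length - 1)).2) := by
    unfold mejorB
    rw [show ((g.length : Int) - 1) = 0 + ((g.length - 1 : Nat) : Int) by omega, mejorB_fold]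
  have hb2 : mejorB g 1 (g.length : Int)
      = ((dpP (gif g 1) (g.length - 1)).2, (dpQ (gif g 1) 1 (g.length - 1)).2) := by
    unfold mejorB
    rw [show ((g.length : Int)) = 1 + ((g.length - 1 : Nat) : Int) by omega, mejorB_fold]
  simp only [lunatico, lunatico_alt, if_neg h0, if_neg h1, if_neg h2, hs1, hs2, hb1, hb2,
    sol_last g 0 (g.length - 1) hm1, sol_last g 1 (g.length - 1) hm1]
  by_cases hpick : (dpP (gif g 0) (g.length - 1)).2 ≥ (dpP (gif g 1) (g.length - 1)).2
  · simp only [if_pos hpick, List.length_map, List.length_range]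
    rw [sol_last g 0 (g.length - 1) hm1]
    have hNC : ¬ (0 < (dpP (gif g 0) 1).2 ∧
        (dpP (gif g 0) (g.length - 1)).2 = (dpP (gif g 0) 1).2) :=
      fun h => hpre (NC1 g hn hpick h.1 h.2)
    rw [loop_spec g 0 (g.length - 1) hm1 _ rfl hNC (g.length - 1) hm1 le_rfl
      (g.length - 1 + 4) [] (by omega)]
    simp
  · simp only [if_neg hpick, List.length_map, List.length_range]
    rw [sol_last g 1 (g.length - 1) hm1]
    have hNC : ¬ (0 < (dpP (gif g 1) 1).2 ∧
        (dpP (gif g 1) (g.length - 1)).2 = (dpP (gif g 1) 1).2) :=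
      fun h => (NC2 g hn hpick h.1 h.2).elim
    rw [loop_spec g 1 (g.length - 1) hm1 _ rfl hNC (g.length - 1) hm1 le_rfl
      (g.length - 1 + 4) [] (by omega)]
    simp

theorem lunatico_raises : Claim_raises_lunatico := by
  unfold Claim_raises_lunatico
  exact ⟨fun g _ hr hp => hp hr, by decide⟩

-- self-check: the stated raise witness is indeed excluded by Pre_
theorem pvRaiseWitnessExcluded_ok : ¬ Pre_lunatico pvRaiseWitness_lunatico :=
  lunatico_raises.1 pvRaiseWitness_lunatico lunatico_raises.2.1 lunatico_raises.2.2.1
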